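-- pv_equiv track=rewrite | github.com/AndreudeDonato/taskerslabgen | src/taskerslabgen/slabcut.py | _filter_sequences_by_cuts
-- ===== SOURCE A (Python) =====
-- def _filter_sequences_by_cuts(zero_dipole, cuts):
--     """Apply the ``cuts`` mode filter to a list of zero-dipole sequences."""
--     if cuts == "all":
--         return list(zero_dipole)
--
--     if not zero_dipole:
--         return []
--
--     all_bot = sorted(set(s["bottom_cut"] for s in zero_dipole))
--     all_top = sorted(set(s["top_cut"] for s in zero_dipole), reverse=True)
--
--     if cuts == "right":
--         fixed_bot = all_bot[0]
--         return [s for s in zero_dipole if s["bottom_cut"] == fixed_bot]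
--     elif cuts == "left":
--         fixed_top = all_top[0]
--         return [s for s in zero_dipole if s["top_cut"] == fixed_top]
--     elif cuts == "all":
--         return list(zero_dipole)
--     else:
--         raise ValueError(
--             f"Unknown cuts mode: {cuts!r}. "
--             f"Must be 'right', 'left', or 'all'."
--         )
-- ===== SOURCE B (Python) =====
-- def _filter_sequences_by_cuts(zero_dipole, cuts):
--     """Single-pass variant: track the best cut value and the kept group as we go."""
--     if cuts == "all":
--         return list(zero_dipole)
--     if not zero_dipole:
--         return []
--     if cuts == "right":
--         key, better = "bottom_cut", (lambda v, b: v < b)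
--     elif cuts == "left":
--         key, better = "top_cut", (lambda v, b: v > b)
--     else:
--         raise ValueError(
--             f"Unknown cuts mode: {cuts!r}. "
--             f"Must be 'right', 'left', or 'all'."
--         )
--     kept, best = [], None
--     for s in zero_dipole:
--         v = s[key]
--         if best is None or better(v, best):
--             kept, best = [s], v
--         elif v == best:
--             kept.append(s)
--     return kept
-- ===== Notes on version B (the rewrite author's own statement) =====
-- stated objective: alternative
-- what changed: Replaces A's build-set/sort/index-then-filter two-phase scheme with a single traversal that maintains the current extremal cut value and the running group of tied sequences.
import Mathlib
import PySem

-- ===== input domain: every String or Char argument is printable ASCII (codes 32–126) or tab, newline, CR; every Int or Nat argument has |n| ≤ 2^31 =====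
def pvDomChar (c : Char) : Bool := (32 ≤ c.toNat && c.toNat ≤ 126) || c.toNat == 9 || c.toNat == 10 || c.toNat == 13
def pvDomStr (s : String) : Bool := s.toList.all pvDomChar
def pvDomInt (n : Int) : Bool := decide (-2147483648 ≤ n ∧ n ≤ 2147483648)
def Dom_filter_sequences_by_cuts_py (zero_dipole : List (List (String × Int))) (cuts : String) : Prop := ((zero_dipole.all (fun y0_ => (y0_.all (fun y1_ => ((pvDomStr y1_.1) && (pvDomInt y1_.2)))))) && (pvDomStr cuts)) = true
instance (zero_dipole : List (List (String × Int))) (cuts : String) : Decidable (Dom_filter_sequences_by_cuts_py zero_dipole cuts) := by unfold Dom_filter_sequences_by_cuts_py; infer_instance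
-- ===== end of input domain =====

-- B: one traversal keeping the running extremal cut value and its tied group, instead of A's build-set/sort/index-then-filter.
-- s["bottom_cut"] on an association list is the first match; the .getD 0 defaults are only read under Pre_, which guarantees the keys are present.
-- ===== PORT A =====
def filter_sequences_by_cuts_py (zero_dipole : List (List (String × Int))) (cuts : String) : List (List (String × Int)) :=
  if cuts = "all" then zero_dipole
  else if zero_dipole = [] then []
  else
    let all_bot := PySem.List.sorted (PySem.Set.ofList (zero_dipole.map (fun s => (List.lookup "bottom_cut" s).getD 0))) (fun x => x) false
    let all_top := PySem.List.sorted (PySem.Set.ofList (zero_dipole.map (fun s => (List.lookup "top_cut" s).getD 0))) (fun x => x) true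
    if cuts = "right" then
      let fixed_bot := PySem.List.pyGetD all_bot 0 0
      zero_dipole.filter (fun s => (List.lookup "bottom_cut" s).getD 0 = fixed_bot)
    else if cuts = "left" then
      let fixed_top := PySem.List.pyGetD all_top 0 0
      zero_dipole.filter (fun s => (List.lookup "top_cut" s).getD 0 = fixed_top)
    else if cuts = "all" then zero_dipole
    else []

def altStep (key : String) (better : Int → Int → Bool)
    (st : List (List (String × Int)) × Option Int) (s : List (String × Int)) :
    List (List (String × Int)) × Option Int :=
  let v := (List.lookup key s).getD 0
  match st.2 with
  | none => ([s], some v)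
  | some b =>
    if better v b then ([s], some v)
    else if v = b then (st.1 ++ [s], some b)
    else st

def filter_sequences_by_cuts_py_alt (zero_dipole : List (List (String × Int))) (cuts : String) : List (List (String × Int)) :=
  if cuts = "all" then zero_dipole
  else if zero_dipole = [] then []
  else if cuts = "right" then
    (zero_dipole.foldl (altStep "bottom_cut" (fun v b => decide (v < b))) ([], none)).1
  else if cuts = "left" then
    (zero_dipole.foldl (altStep "top_cut" (fun v b => decide (b < v))) ([], none)).1
  else []

-- ===== PRECONDITION & SPEC =====
-- Pre_ = exactly where Python A returns: cuts "all", or an empty list (returned before mode validation),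
-- or a valid mode with both cut keys present in every dict (A reads both even when only one is used);
-- otherwise A raises ValueError (unknown mode) or KeyError (missing key).
def Pre_filter_sequences_by_cuts_py (zero_dipole : List (List (String × Int))) (cuts : String) : Prop :=
  cuts = "all" ∨ zero_dipole = [] ∨
    ((cuts = "right" ∨ cuts = "left") ∧
      ∀ s ∈ zero_dipole, (List.lookup "bottom_cut" s).isSome ∧ (List.lookup "top_cut" s).isSome)
instance (zero_dipole : List (List (String × Int))) (cuts : String) : Decidable (Pre_filter_sequences_by_cuts_py zero_dipole cuts) := by unfold Pre_filter_sequences_by_cuts_py; infer_instance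
def pvWitness_filter_sequences_by_cuts_py : (List (List (String × Int))) × String :=
  ([[("bottom_cut", 2), ("top_cut", 5)], [("bottom_cut", 1), ("top_cut", 7)], [("bottom_cut", 1), ("top_cut", 7)]], "right")
def Spec_filter_sequences_by_cuts_py (zero_dipole : List (List (String × Int))) (cuts : String) (out : List (List (String × Int))) : Prop := out = filter_sequences_by_cuts_py_alt zero_dipole cuts
instance (zero_dipole : List (List (String × Int))) (cuts : String) (out : List (List (String × Int))) : Decidable (Spec_filter_sequences_by_cuts_py zero_dipole cuts out) := by unfold Spec_filter_sequences_by_cuts_py; infer_instance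

-- ===== CLAIM (what is proved, stated in full; the proofs are below) =====
def Claim_equal_filter_sequences_by_cuts_py : Prop := ∀ (zero_dipole : List (List (String × Int))) (cuts : String), Dom_filter_sequences_by_cuts_py zero_dipole cuts → Pre_filter_sequences_by_cuts_py zero_dipole cuts → Spec_filter_sequences_by_cuts_py zero_dipole cuts (filter_sequences_by_cuts_py zero_dipole cuts)

-- ===== LEMMAS AND PROOFS =====

def bestOf (lt : Int → Int → Bool) (b : Int) (vs : List Int) : Int :=
  vs.foldl (fun m v => if lt v m then v else m) b

theorem bestOf_mem (lt : Int → Int → Bool) (b : Int) (vs : List Int) :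
    bestOf lt b vs ∈ b :: vs := by
  induction vs generalizing b with
  | nil => simp [bestOf]
  | cons v t ih =>
    have hstep : bestOf lt b (v :: t) = bestOf lt (if lt v b then v else b) t := by
      simp [bestOf]
    rw [hstep]
    have h := ih (if lt v b then v else b)
    rw [List.mem_cons] at h
    rcases h with h | h
    · rw [h]; split <;> simp
    · simp [h]

theorem bestOf_best (lt : Int → Int → Bool)
    (hirr : ∀ a, lt a a = false)
    (htrans : ∀ a b c, lt a b = true → lt b c = true → lt a c = true)
    (htot : ∀ a b, lt a b = false → lt b a = false → a = b)
    (b : Int) (vs : List Int) :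
    ∀ y ∈ b :: vs, lt y (bestOf lt b vs) = false := by
  induction vs generalizing b with
  | nil =>
    intro y hy; simp at hy; subst hy; simpa [bestOf] using hirr y
  | cons v t ih =>
    intro y hy
    have hstep : bestOf lt b (v :: t) = bestOf lt (if lt v b then v else b) t := by simp [bestOf]
    rw [hstep]
    set start := if lt v b then v else b with hstart
    have hIH := ih start
    set m := bestOf lt start t with hm
    have hstartm : lt start m = false := hIH start (by simp)
    rw [List.mem_cons, List.mem_cons] at hy
    rcases hy with hyb | hyv | hy
    · -- y = b
      rw [hyb]
      by_cases hvb : lt v b = true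
      · by_contra h
        simp at h
        have hcontra : lt v m = true := htrans v b m hvb h
        rw [hstart, if_pos hvb] at hstartm
        simp [hcontra] at hstartm
      · simp at hvb
        rw [hstart, if_neg (by simp [hvb])] at hstartm
        exact hstartm
    · -- y = v
      rw [hyv]
      by_cases hvb : lt v b = true
      · rw [hstart, if_pos hvb] at hstartm; exact hstartm
      · simp at hvb
        rw [hstart, if_neg (by simp [hvb])] at hstartm
        by_contra h
        simp at h
        cases hbv : lt b v with
        | true =>
          have : lt b m = true := htrans b v m hbv h
          simp [this] at hstartm
        | false =>
          have hvb' : v = b := htot v b hvb hbv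
          rw [hvb'] at h; simp [h] at hstartm
    · exact hIH y (by simp [hy])

theorem altStep_foldl_inv (key : String) (lt : Int → Int → Bool)
    (hirr : ∀ a, lt a a = false)
    (htrans : ∀ a b c, lt a b = true → lt b c = true → lt a c = true)
    (htot : ∀ a b, lt a b = false → lt b a = false → a = b)
    (l : List (List (String × Int))) :
    ∀ (kept : List (List (String × Int))) (b : Int),
      l.foldl (altStep key lt) (kept, some b) =
        ((if bestOf lt b (l.map (fun s => (List.lookup key s).getD 0)) = b then kept else []) ++
          l.filter (fun s => (List.lookup key s).getD 0 = bestOf lt b (l.map (fun s => (List.lookup key s).getD 0))),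
         some (bestOf lt b (l.map (fun s => (List.lookup key s).getD 0)))) := by
  induction l with
  | nil => intro kept b; simp [bestOf]
  | cons s t ih =>
    intro kept b
    set v := (List.lookup key s).getD 0 with hv
    have hstep : bestOf lt b (v :: t.map (fun s => (List.lookup key s).getD 0))
        = bestOf lt (if lt v b then v else b) (t.map (fun s => (List.lookup key s).getD 0)) := by
      simp [bestOf]
    by_cases hvb : lt v b = true
    · -- reset to [s]
      have h1 : List.foldl (altStep key lt) (kept, some b) (s :: t)
          = List.foldl (altStep key lt) ([s], some v) t := by
        simp [altStep, ← hv, hvb]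
      rw [h1, ih [s] v]
      set m := bestOf lt v (t.map (fun s => (List.lookup key s).getD 0)) with hm
      have hmb : bestOf lt b ((s :: t).map (fun s => (List.lookup key s).getD 0)) = m := by
        simp only [List.map_cons, ← hv, hstep, if_pos hvb, hm]
      rw [hmb]
      have hmneb : m ≠ b := by
        intro hEq
        have := bestOf_best lt hirr htrans htot v (t.map (fun s => (List.lookup key s).getD 0)) v (by simp)
        rw [← hm, hEq] at this
        simp [hvb] at this
      rw [if_neg hmneb]
      by_cases hvm : m = v
      · simp [List.filter_cons, ← hv, hvm]
      · have : ¬ (v = m) := fun h => hvm h.symm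
        simp [List.filter_cons, ← hv, this, hvm]
    · simp at hvb
      have hmb : bestOf lt b ((s :: t).map (fun s => (List.lookup key s).getD 0))
          = bestOf lt b (t.map (fun s => (List.lookup key s).getD 0)) := by
        simp only [List.map_cons, ← hv, hstep, if_neg (by simp [hvb] : ¬ lt v b = true)]
      rw [hmb]
      set m := bestOf lt b (t.map (fun s => (List.lookup key s).getD 0)) with hm
      by_cases hveqb : v = b
      · -- append s
        have h1 : List.foldl (altStep key lt) (kept, some b) (s :: t)
            = List.foldl (altStep key lt) (kept ++ [s], some b) t := by
          simp [altStep, ← hv, hvb, hveqb, hirr]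
        rw [h1, ih (kept ++ [s]) b, ← hm]
        by_cases hmB : m = b
        · rw [if_pos hmB, if_pos hmB]
          simp [List.filter_cons, ← hv, hveqb, hmB]
        · rw [if_neg hmB, if_neg hmB]
          have : ¬ (v = m) := by rw [hveqb]; exact fun h => hmB h.symm
          simp [List.filter_cons, ← hv, this]
      · -- skip s
        have h1 : List.foldl (altStep key lt) (kept, some b) (s :: t)
            = List.foldl (altStep key lt) (kept, some b) t := by
          simp [altStep, ← hv, hvb, hveqb, hirr]
        rw [h1, ih kept b, ← hm]
        have hvm : ¬ (v = m) := by
          intro hEq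
          have hbm : lt b m = false :=
            bestOf_best lt hirr htrans htot b (t.map (fun s => (List.lookup key s).getD 0)) b (by simp)
          have : m = b := htot m b (hEq ▸ hvb) hbm
          exact hveqb (hEq.trans this)
        simp [List.filter_cons, ← hv, hvm]

-- head of A's sorted set = B's fold extremum, hence A's filter = B's fold result
theorem branch_eq (key : String) (lt : Int → Int → Bool)
    (hirr : ∀ a, lt a a = false)
    (htrans : ∀ a b c, lt a b = true → lt b c = true → lt a c = true)
    (htot : ∀ a b, lt a b = false → lt b a = false → a = b)
    (s0 : List (String × Int)) (rest : List (List (String × Int)))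
    (hd : Int)
    (hhd : hd ∈ (s0 :: rest).map (fun s => (List.lookup key s).getD 0))
    (hbest : ∀ y ∈ (s0 :: rest).map (fun s => (List.lookup key s).getD 0), lt y hd = false) :
    (s0 :: rest).filter (fun s => (List.lookup key s).getD 0 = hd) =
      ((s0 :: rest).foldl (altStep key lt) ([], none)).1 := by
  set v0 := (List.lookup key s0).getD 0 with hv0
  have h1 : (s0 :: rest).foldl (altStep key lt) ([], none)
      = rest.foldl (altStep key lt) ([s0], some v0) := by
    simp [altStep, ← hv0]
  set vs := rest.map (fun s => (List.lookup key s).getD 0) with hvs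
  set m := bestOf lt v0 vs with hm
  have hmmem : m ∈ (s0 :: rest).map (fun s => (List.lookup key s).getD 0) := by
    rw [List.map_cons, ← hv0, ← hvs]
    exact bestOf_mem lt v0 vs
  have hhd' : hd ∈ v0 :: vs := by
    rw [List.map_cons, ← hv0, ← hvs] at hhd
    exact hhd
  have heq : hd = m :=
    (htot m hd (hbest m hmmem) (bestOf_best lt hirr htrans htot v0 vs hd hhd')).symm
  rw [h1, altStep_foldl_inv key lt hirr htrans htot rest [s0] v0, ← hvs, ← hm]
  by_cases hmv0 : m = v0
  · rw [if_pos hmv0]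
    simp [List.filter_cons, ← hv0, heq, hmv0]
  · rw [if_neg hmv0]
    have hne : ¬ (v0 = m) := fun h => hmv0 h.symm
    simp [List.filter_cons, ← hv0, hne, heq]

-- ===== VERDICT (by name: the statement is the Claim_ definition above) =====
theorem filter_sequences_by_cuts_py_spec : Claim_equal_filter_sequences_by_cuts_py := by
  unfold Claim_equal_filter_sequences_by_cuts_py
  intro zd cuts _hdom hpre
  unfold Pre_filter_sequences_by_cuts_py at hpre
  unfold Spec_filter_sequences_by_cuts_py
  by_cases hall : cuts = "all"
  · simp [filter_sequences_by_cuts_py, filter_sequences_by_cuts_py_alt, hall]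
  · by_cases hnil : zd = []
    · simp [filter_sequences_by_cuts_py, filter_sequences_by_cuts_py_alt, hall, hnil]
    · rcases hpre with h | h | ⟨hmode, _hkeys⟩
      · exact absurd h hall
      · exact absurd h hnil
      · obtain ⟨s0, rest, rfl⟩ : ∃ s0 rest, zd = s0 :: rest := by
          cases zd with
          | nil => exact absurd rfl hnil
          | cons a l => exact ⟨a, l, rfl⟩
        rcases hmode with hright | hleft
        · -- cuts = "right": min of bottom_cut
          subst hright
          simp only [filter_sequences_by_cuts_py, filter_sequences_by_cuts_py_alt,
            if_neg hall, if_neg hnil, if_pos rfl, reduceIte]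
          set vals := (s0 :: rest).map (fun s => (List.lookup "bottom_cut" s).getD 0) with hvals
          set sl := PySem.List.sorted (PySem.Set.ofList vals) (fun x => x) false with hsl
          have hne : sl ≠ [] := by
            rw [hsl, Ne, PySem.List.sorted_eq_nil_iff]
            intro h
            have : (List.lookup "bottom_cut" s0).getD 0 ∈ PySem.Set.ofList vals := by
              rw [PySem.Set.mem_ofList]; simp [hvals]
            rw [h] at this; simp at this
          obtain ⟨hd, tl, hhd⟩ : ∃ hd tl, sl = hd :: tl := by
            cases h : sl with
            | nil => exact absurd h hne
            | cons a l => exact ⟨a, l, rfl⟩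
          rw [hhd, PySem.List.pyGetD_zero_cons]
          apply branch_eq "bottom_cut" (fun v b => decide (v < b))
            (by intro a; simp) (by intro a b c; simp; omega) (by intro a b; simp; omega)
          · have : hd ∈ sl := by rw [hhd]; simp
            rw [hsl, PySem.List.mem_sorted, PySem.Set.mem_ofList] at this
            exact this
          · intro y hy
            have hle := PySem.List.key_head_sorted_le (PySem.Set.ofList vals) (fun x => x) hhd y
              (by rw [PySem.Set.mem_ofList]; exact hy)
            simp at hle ⊢
            omega
        · -- cuts = "left": max of top_cut
          subst hleft
          simp only [filter_sequences_by_cuts_py, filter_sequences_by_cuts_py_alt,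
            if_neg hall, if_neg hnil, reduceIte]
          set vals := (s0 :: rest).map (fun s => (List.lookup "top_cut" s).getD 0) with hvals
          set sl := PySem.List.sorted (PySem.Set.ofList vals) (fun x => x) true with hsl
          have hne : sl ≠ [] := by
            rw [hsl, Ne, PySem.List.sorted_eq_nil_iff]
            intro h
            have : (List.lookup "top_cut" s0).getD 0 ∈ PySem.Set.ofList vals := by
              rw [PySem.Set.mem_ofList]; simp [hvals]
            rw [h] at this; simp at this
          obtain ⟨hd, tl, hhd⟩ : ∃ hd tl, sl = hd :: tl := by
            cases h : sl with
            | nil => exact absurd h hne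
            | cons a l => exact ⟨a, l, rfl⟩
          rw [hhd, PySem.List.pyGetD_zero_cons]
          apply branch_eq "top_cut" (fun v b => decide (b < v))
            (by intro a; simp) (by intro a b c; simp; omega) (by intro a b; simp; omega)
          · have : hd ∈ sl := by rw [hhd]; simp
            rw [hsl, PySem.List.mem_sorted, PySem.Set.mem_ofList] at this
            exact this
          · intro y hy
            have hle := PySem.List.key_head_sorted_rev_ge (PySem.Set.ofList vals) (fun x => x) hhd y
              (by rw [PySem.Set.mem_ofList]; exact hy)
            simp at hle ⊢
            omega
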